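-- pv_equiv track=rewrite | github.com/doctorBeast/FinalYearProject | Side Work/Disparity.py | find_col_BGR
-- ===== SOURCE A (Python) =====
-- def find_col_BGR(col):
--     B = 0
--     G = 0
--     R = 0
--
--     for i in range(len(col[0])):
--         B += col[0][i][0]
--
--     for i in range(len(col[0])):
--         G += col[0][i][1]
--
--     for i in range(len(col[0])):
--         R += col[0][i][2]
--
--     return B,G,R
-- ===== SOURCE B (Python) =====
-- def find_col_BGR(col):
--     B = 0
--     G = 0
--     R = 0
--     for p in col[0]:
--         B += p[0]
--         G += p[1]
--         R += p[2]
--     return B, G, R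
-- ===== Notes on version B (the rewrite author's own statement) =====
-- stated objective: simpler
-- what changed: Replaces A's three separate index-based passes over col[0] with a single direct iteration maintaining the three accumulators at once.
import Mathlib
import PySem

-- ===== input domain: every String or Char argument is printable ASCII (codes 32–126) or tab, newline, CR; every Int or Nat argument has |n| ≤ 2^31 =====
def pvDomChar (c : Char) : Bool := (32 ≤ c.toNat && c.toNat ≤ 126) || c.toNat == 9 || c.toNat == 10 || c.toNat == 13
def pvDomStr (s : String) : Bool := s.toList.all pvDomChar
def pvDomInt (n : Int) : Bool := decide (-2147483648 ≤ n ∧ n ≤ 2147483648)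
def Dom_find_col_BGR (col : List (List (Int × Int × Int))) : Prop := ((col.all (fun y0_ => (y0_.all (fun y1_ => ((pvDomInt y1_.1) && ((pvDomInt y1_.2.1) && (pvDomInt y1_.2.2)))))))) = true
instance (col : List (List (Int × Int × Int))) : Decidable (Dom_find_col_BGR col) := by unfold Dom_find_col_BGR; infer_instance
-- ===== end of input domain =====

-- B fuses A's three index-based passes over col[0] into one direct pass with three accumulators (simpler; same cost).


-- ===== PORT A =====
-- A: reads col[0] (raises IndexError on empty col, excluded by Pre_), then three
-- separate loops 'for i in range(len(col[0]))' accumulating B, G, R by index.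
def find_col_BGR (col : List (List (Int × Int × Int))) : Int × Int × Int :=
  match col with
  | [] => (0, 0, 0)  -- unreachable under Pre_ (Python raises IndexError on col[0])
  | c0 :: _ =>
    let B := (List.range c0.length).foldl (fun a i => a + (c0.getD i (0, 0, 0)).1) 0
    let G := (List.range c0.length).foldl (fun a i => a + (c0.getD i (0, 0, 0)).2.1) 0
    let R := (List.range c0.length).foldl (fun a i => a + (c0.getD i (0, 0, 0)).2.2) 0
    (B, G, R)

-- ===== PORT B =====
-- B: one pass 'for p in col[0]' updating the triple (B, G, R).
def find_col_BGR_alt (col : List (List (Int × Int × Int))) : Int × Int × Int :=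
  match col with
  | [] => (0, 0, 0)  -- unreachable under Pre_ (Python raises IndexError on col[0])
  | c0 :: _ =>
    c0.foldl (fun (acc : Int × Int × Int) p =>
      (acc.1 + p.1, acc.2.1 + p.2.1, acc.2.2 + p.2.2)) (0, 0, 0)

-- ===== PRECONDITION & SPEC =====
-- Pre_ excludes only empty col, on which the Python A raises IndexError at col[0].
def Pre_find_col_BGR (col : List (List (Int × Int × Int))) : Prop := col ≠ []
instance (col : List (List (Int × Int × Int))) : Decidable (Pre_find_col_BGR col) := by unfold Pre_find_col_BGR; infer_instance
def pvWitness_find_col_BGR : (List (List (Int × Int × Int))) := [[(1, 2, 3), (4, 5, 6)]]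
def Spec_find_col_BGR (col : List (List (Int × Int × Int))) (out : Int × Int × Int) : Prop := out = find_col_BGR_alt col
instance (col : List (List (Int × Int × Int))) (out : Int × Int × Int) : Decidable (Spec_find_col_BGR col out) := by unfold Spec_find_col_BGR; infer_instance

-- ===== CLAIM (what is proved, stated in full; the proofs are below) =====
def Claim_equal_find_col_BGR : Prop := ∀ (col : List (List (Int × Int × Int))), Dom_find_col_BGR col → Pre_find_col_BGR col → Spec_find_col_BGR col (find_col_BGR col)

-- ===== LEMMAS AND PROOFS =====

-- A's index loop over range(len l) equals a direct fold over l.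
theorem foldl_range_getD (f : Int × Int × Int → Int) :
    ∀ (l : List (Int × Int × Int)) (s : Int),
      (List.range l.length).foldl (fun a i => a + f (l.getD i (0, 0, 0))) s
        = l.foldl (fun a x => a + f x) s := by
  intro l
  induction l with
  | nil => intro s; simp
  | cons x xs ih =>
    intro s
    simp only [List.length_cons, List.range_succ_eq_map, List.foldl_cons, List.foldl_map,
      List.getD_cons_zero, List.getD_cons_succ]
    exact ih (s + f x)

-- B's single fold computes the three component sums.
theorem foldl_triple (l : List (Int × Int × Int)) :
    ∀ (b g r : Int),
      l.foldl (fun (acc : Int × Int × Int) p =>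
          (acc.1 + p.1, acc.2.1 + p.2.1, acc.2.2 + p.2.2)) (b, g, r)
        = (l.foldl (fun a x => a + x.1) b,
           l.foldl (fun a x => a + x.2.1) g,
           l.foldl (fun a x => a + x.2.2) r) := by
  induction l with
  | nil => intro b g r; simp
  | cons x xs ih => intro b g r; simpa using ih (b + x.1) (g + x.2.1) (r + x.2.2)

-- ===== VERDICT (by name: the statement is the Claim_ definition above) =====
theorem find_col_BGR_spec : Claim_equal_find_col_BGR := by
  intro col _ hpre
  unfold Spec_find_col_BGR find_col_BGR find_col_BGR_alt
  match col with
  | [] => exact absurd rfl hpre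
  | c0 :: rest =>
    simp only
    rw [foldl_triple, foldl_range_getD (fun p => p.1), foldl_range_getD (fun p => p.2.1),
      foldl_range_getD (fun p => p.2.2)]
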